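-- pv_equiv track=rewrite | github.com/yangyang0126/PythonLearning | Basics/Practice/每日一练_201908/每日一练0809.py | solution
-- ===== SOURCE A (Python) =====
-- def solution(lst):
--   sum=0
--   while len(lst)!=1:
--     a=lst.pop(0)
--     b=max(lst)
--     if b-a>sum:
--       sum=b-a
--   return sum
-- ===== SOURCE B (Python) =====
-- def solution(lst):
--     # One right-to-left pass: track the running suffix maximum.
--     # (A mutates its argument; B does not — equivalence is about the return value.)
--     best = 0
--     suffix_max = None
--     for x in reversed(lst):
--         if suffix_max is not None and suffix_max - x > best:
--             best = suffix_max - x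
--         if suffix_max is None or x > suffix_max:
--             suffix_max = x
--     return best
-- ===== Notes on version B (the rewrite author's own statement) =====
-- stated objective: faster
-- what changed: Replaces the pop-and-rescan loop (max of the remaining list at every step) by a single right-to-left pass that maintains the running suffix maximum.
import Mathlib
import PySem

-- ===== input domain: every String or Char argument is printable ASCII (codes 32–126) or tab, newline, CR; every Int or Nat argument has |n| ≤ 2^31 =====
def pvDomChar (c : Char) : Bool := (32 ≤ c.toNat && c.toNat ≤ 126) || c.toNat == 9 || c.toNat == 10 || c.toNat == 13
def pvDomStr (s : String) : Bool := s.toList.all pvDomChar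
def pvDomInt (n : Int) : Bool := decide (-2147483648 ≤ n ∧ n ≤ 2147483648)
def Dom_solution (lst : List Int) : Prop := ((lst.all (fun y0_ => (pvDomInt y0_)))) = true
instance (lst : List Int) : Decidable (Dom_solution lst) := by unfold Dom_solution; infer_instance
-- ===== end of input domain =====

-- B replaces A's quadratic pop-and-rescan loop by a single right-to-left pass
-- tracking the running suffix maximum (objective: faster; return value only — A
-- mutates its argument, B does not).

-- ===== PORT A =====
-- while len(lst)!=1: a=lst.pop(0); b=max(lst); if b-a>sum: sum=b-a
def solutionLoopA : List Int → Int → Int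
  | [], _ => 0            -- Python: lst.pop(0) raises IndexError here (outside Pre_)
  | [_], s => s           -- len(lst) == 1: loop exits, return sum
  | a :: rest, s =>
      match PySem.List.max? rest (fun y => y) with
      | none => s         -- unreachable: rest ≠ [] in this branch
      | some b => solutionLoopA rest (if b - a > s then b - a else s)

def solution (lst : List Int) : Int := solutionLoopA lst 0

-- ===== PORT B =====
-- loop body of Source B; state = (best, suffix_max)
def stepB (st : Int × Option Int) (x : Int) : Int × Option Int :=
  match st with
  | (b, none) => (b, some x)
  | (b, some m) => (if m - x > b then m - x else b, if x > m then some x else some m)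

def solution_alt (lst : List Int) : Int := (lst.reverse.foldl stepB (0, none)).1

-- ===== PRECONDITION & SPEC =====
-- Pre_ excludes exactly the empty list, on which A raises IndexError (pop from empty list).
def Pre_solution (lst : List Int) : Prop := lst ≠ []
instance (lst : List Int) : Decidable (Pre_solution lst) := by unfold Pre_solution; infer_instance
def pvWitness_solution : List Int := [3, 1, 4]

def Spec_solution (lst : List Int) (out : Int) : Prop := out = solution_alt lst
instance (lst : List Int) (out : Int) : Decidable (Spec_solution lst out) := by unfold Spec_solution; infer_instance

-- ===== CLAIM (what is proved, stated in full; the proofs are below) =====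
def Claim_equal_solution : Prop := ∀ (lst : List Int), Dom_solution lst → Pre_solution lst → Spec_solution lst (solution lst)

-- ===== LEMMAS AND PROOFS =====

-- B's fold over the reversed list, written as a foldr over the list itself.
def gB (lst : List Int) : Int × Option Int := lst.foldr (fun x st => stepB st x) (0, none)

theorem solution_alt_eq_gB (lst : List Int) : solution_alt lst = (gB lst).1 := by
  simp [solution_alt, gB, List.foldl_reverse]

theorem foldl_max_comm (t : List Int) : ∀ a b : Int, t.foldl max (max a b) = max a (t.foldl max b) := by
  induction t with
  | nil => intro a b; rfl
  | cons y ys ih =>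
      intro a b
      simp only [List.foldl_cons]
      rw [max_assoc, ih]

theorem gB_snd (xs : List Int) : ∀ x : Int, (gB (x :: xs)).2 = some (xs.foldl max x) := by
  induction xs with
  | nil => intro x; rfl
  | cons y t ih =>
      intro x
      have h : gB (x :: y :: t) = stepB (gB (y :: t)) x := rfl
      have h2 : gB (y :: t) = ((gB (y :: t)).1, (gB (y :: t)).2) := rfl
      rw [h, h2, ih y, stepB]
      have : (if x > t.foldl max y then some x else some (t.foldl max y))
            = some (max x (t.foldl max y)) := by
        rcases le_or_gt x (t.foldl max y) with hle | hgt
        · simp [not_lt.mpr hle, max_eq_right hle]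
        · simp [hgt, max_eq_left (le_of_lt hgt)]
      rw [this, List.foldl_cons, foldl_max_comm]

theorem gB_fst_nonneg (lst : List Int) : 0 ≤ (gB lst).1 := by
  induction lst with
  | nil => simp [gB]
  | cons x xs ih =>
      have h : gB (x :: xs) = stepB (gB xs) x := rfl
      have h2 : gB xs = ((gB xs).1, (gB xs).2) := rfl
      rw [h, h2]
      rcases hm : (gB xs).2 with _ | m
      · simpa [stepB] using ih
      · simp only [stepB]
        split_ifs with h1 <;> omega

theorem loopA_eq (lst : List Int) : ∀ s : Int, lst ≠ [] → 0 ≤ s → solutionLoopA lst s = max s (gB lst).1 := by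
  induction lst with
  | nil => intro s h; exact absurd rfl h
  | cons a rest ih =>
      intro s _ hs
      cases rest with
      | nil =>
          have : (gB [a]).1 = 0 := rfl
          simp [solutionLoopA, this, max_eq_left hs]
      | cons r rs =>
          have hmax : PySem.List.max? (r :: rs) (fun y => y) = some (rs.foldl max r) :=
            PySem.List.max?_id_cons r rs
          have hA : solutionLoopA (a :: r :: rs) s
              = solutionLoopA (r :: rs) (if rs.foldl max r - a > s then rs.foldl max r - a else s) := by
            simp [solutionLoopA, hmax]
          set b := rs.foldl max r with hb
          have hs' : (0:Int) ≤ (if b - a > s then b - a else s) := by split_ifs <;> omega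
          rw [hA, ih _ (by simp) hs']
          have hgb : gB (a :: r :: rs) = stepB (gB (r :: rs)) a := rfl
          have h2 : gB (r :: rs) = ((gB (r :: rs)).1, (gB (r :: rs)).2) := rfl
          have hsnd := gB_snd rs r
          rw [hgb, h2, hsnd, ← hb, stepB]
          have hnn := gB_fst_nonneg (r :: rs)
          set p := (gB (r :: rs)).1
          simp only [max_def]
          split_ifs <;> omega

theorem solution_spec : Claim_equal_solution := by
  intro lst _ hpre
  unfold Spec_solution
  rw [solution_alt_eq_gB, solution, loopA_eq lst 0 hpre le_rfl,
      max_eq_right (gB_fst_nonneg lst)]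

-- ===== VERDICT (by name: the statement is the Claim_ definition above) =====
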